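-- pv_equiv track=rewrite | github.com/userstar713/m3-project | application/db_extension/dictionary_lookup/lookup.py | get_run_length
-- ===== SOURCE A (Python) =====
-- def get_run_length(matched_words):
--     max_run = 1
--     for index, word in enumerate(matched_words[:-1]):  #
--         query_indx = matched_words[index]['query_indx']
--         cand_indx = matched_words[index]['cand_indx']
--         next_query_indx = matched_words[index + 1]['query_indx']
--         next_cand_indx = matched_words[index + 1]['cand_indx']
--
--         if (next_query_indx - query_indx == 1) and (
--                 next_cand_indx - cand_indx == 1):
--             max_run += 1
--         else:
--             max_run = 1
--
--     return max_run
-- ===== SOURCE B (Python) =====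
-- def get_run_length(matched_words):
--     run = 1
--     for i in range(len(matched_words) - 1, 0, -1):
--         if (matched_words[i]['query_indx'] - matched_words[i - 1]['query_indx'] == 1
--                 and matched_words[i]['cand_indx'] - matched_words[i - 1]['cand_indx'] == 1):
--             run += 1
--         else:
--             break
--     return run
-- ===== Notes on version B (the rewrite author's own statement) =====
-- stated objective: alternative
-- what changed: B scans backwards from the last pair and stops at the first non-consecutive pair, instead of A's full forward scan that keeps resetting a counter; only the trailing run is ever counted.
import Mathlib
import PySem

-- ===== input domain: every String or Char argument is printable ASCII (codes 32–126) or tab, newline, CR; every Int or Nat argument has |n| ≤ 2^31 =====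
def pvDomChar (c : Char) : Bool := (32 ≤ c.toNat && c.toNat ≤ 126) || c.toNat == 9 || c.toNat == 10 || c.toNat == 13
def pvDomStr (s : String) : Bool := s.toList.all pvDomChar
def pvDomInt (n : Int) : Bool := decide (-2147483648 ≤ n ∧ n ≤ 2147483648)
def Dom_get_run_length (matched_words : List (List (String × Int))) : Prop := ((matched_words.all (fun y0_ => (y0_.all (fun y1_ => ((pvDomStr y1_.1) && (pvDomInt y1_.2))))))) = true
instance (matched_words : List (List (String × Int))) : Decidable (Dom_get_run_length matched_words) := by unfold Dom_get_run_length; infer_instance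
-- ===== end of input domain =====

-- B replaces A's full forward scan (counter with reset) by a backward scan from the
-- end that stops at the first non-consecutive pair; only the trailing run is counted.


-- ===== PORT A =====
-- d['k'] on an association-list dict: first match; the default 0 is only reached
-- outside Pre_ (Python raises KeyError there).
def pvDget (d : List (String × Int)) (k : String) : Int := (d.lookup k).getD 0

-- literal port of A: for index, word in enumerate(matched_words[:-1]) with indexed access
def get_run_length (matched_words : List (List (String × Int))) : Int :=
  (PySem.List.enumerate (PySem.List.slice matched_words none (some (-1))) 0).foldl
    (fun max_run iw =>
      let query_indx := pvDget (PySem.List.pyGetD matched_words iw.1 []) "query_indx"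
      let cand_indx := pvDget (PySem.List.pyGetD matched_words iw.1 []) "cand_indx"
      let next_query_indx := pvDget (PySem.List.pyGetD matched_words (iw.1 + 1) []) "query_indx"
      let next_cand_indx := pvDget (PySem.List.pyGetD matched_words (iw.1 + 1) []) "cand_indx"
      if next_query_indx - query_indx = 1 ∧ next_cand_indx - cand_indx = 1
      then max_run + 1 else 1)
    1

-- ===== PORT B =====
-- B's backward loop with break, as structural recursion on the reversed list:
-- head = current element, second = previous element of the original list.
def pvAltRun : List (List (String × Int)) → Int
  | cur :: prev :: rest =>
    if pvDget cur "query_indx" - pvDget prev "query_indx" = 1 ∧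
       pvDget cur "cand_indx" - pvDget prev "cand_indx" = 1
    then 1 + pvAltRun (prev :: rest) else 1
  | _ => 1

def get_run_length_alt (matched_words : List (List (String × Int))) : Int :=
  pvAltRun matched_words.reverse

-- ===== PRECONDITION & SPEC =====
-- Pre_ excludes exactly the inputs on which Python A raises KeyError: a list of at
-- least two word dicts where some dict lacks the key 'query_indx' or 'cand_indx'.
def Pre_get_run_length (matched_words : List (List (String × Int))) : Prop :=
  2 ≤ matched_words.length →
    ∀ w ∈ matched_words, (w.lookup "query_indx").isSome ∧ (w.lookup "cand_indx").isSome
instance (matched_words : List (List (String × Int))) : Decidable (Pre_get_run_length matched_words) := by unfold Pre_get_run_length; infer_instance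

def pvWitness_get_run_length : (List (List (String × Int))) :=
  [[("query_indx", 3), ("cand_indx", 5)], [("query_indx", 4), ("cand_indx", 6)]]

def Spec_get_run_length (matched_words : List (List (String × Int))) (out : Int) : Prop := out = get_run_length_alt matched_words
instance (matched_words : List (List (String × Int))) (out : Int) : Decidable (Spec_get_run_length matched_words out) := by unfold Spec_get_run_length; infer_instance

-- ===== CLAIM (what is proved, stated in full; the proofs are below) =====
def Claim_equal_get_run_length : Prop := ∀ (matched_words : List (List (String × Int))), Dom_get_run_length matched_words → Pre_get_run_length matched_words → Spec_get_run_length matched_words (get_run_length matched_words)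

-- ===== LEMMAS AND PROOFS =====

-- the loop body of A, as a step over an adjacent pair (previous, current)
def pvStep (r : Int) (p : List (String × Int) × List (String × Int)) : Int :=
  if pvDget p.2 "query_indx" - pvDget p.1 "query_indx" = 1 ∧
     pvDget p.2 "cand_indx" - pvDget p.1 "cand_indx" = 1
  then r + 1 else 1

lemma pv_pairs_eq (mw : List (List (String × Int))) :
    (PySem.List.enumerate mw.dropLast 0).map
      (fun iw => (PySem.List.pyGetD mw iw.1 [], PySem.List.pyGetD mw (iw.1 + 1) []))
    = mw.zip mw.tail := by
  apply List.ext_getElem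
  · simp [PySem.List.length_enumerate]
  · intro k h1 h2
    have hk : k < mw.length - 1 := by
      simpa [PySem.List.length_enumerate] using h1
    have hk1 : k < mw.length := by omega
    have hk2 : k + 1 < mw.length := by omega
    simp [PySem.List.getElem_enumerate, List.getElem_zip, List.getElem_tail]
    constructor
    · rw [List.getElem?_eq_getElem hk1]; rfl
    · rw [show ((k : Int) + 1) = (((k + 1 : Nat)) : Int) from by push_cast; ring,
        PySem.List.pyGetD_natCast]
      exact List.getD_eq_getElem _ _ hk2

lemma pv_bridgeA (mw : List (List (String × Int))) :
    get_run_length mw = (mw.zip mw.tail).foldl pvStep 1 := by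
  unfold get_run_length
  rw [PySem.List.slice_to_neg_one]
  rw [← pv_pairs_eq mw, List.foldl_map]
  rfl

lemma pv_zipTail_concat (xs : List (List (String × Int))) (h : xs ≠ []) (b : List (String × Int)) :
    (xs ++ [b]).zip ((xs ++ [b]).tail) = xs.zip xs.tail ++ [(xs.getLast h, b)] := by
  induction xs with
  | nil => exact absurd rfl h
  | cons a t ih =>
    cases t with
    | nil => simp
    | cons c t' =>
      have hih := ih (by simp)
      simp only [List.cons_append, List.tail_cons, List.zip_cons_cons] at hih ⊢
      rw [hih]
      simp [List.getLast_cons]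

lemma pv_revRun (r : List (List (String × Int))) :
    (r.reverse.zip r.reverse.tail).foldl pvStep 1 = pvAltRun r := by
  induction r with
  | nil => simp [pvAltRun]
  | cons a t ih =>
    cases t with
    | nil => simp [pvAltRun]
    | cons b rest =>
      have hne : (b :: rest).reverse ≠ [] := by simp
      have hrev : (a :: b :: rest).reverse = (b :: rest).reverse ++ [a] := by simp
      have hlast : (b :: rest).reverse.getLast hne = b := by
        simp
      rw [hrev, pv_zipTail_concat _ hne a, List.foldl_append, hlast, ih]
      show pvStep (pvAltRun (b :: rest)) (b, a) = pvAltRun (a :: b :: rest)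
      rw [show pvAltRun (a :: b :: rest) =
            (if pvDget a "query_indx" - pvDget b "query_indx" = 1 ∧
                pvDget a "cand_indx" - pvDget b "cand_indx" = 1
             then 1 + pvAltRun (b :: rest) else 1) from rfl]
      simp only [pvStep]
      split_ifs with hcond
      · omega
      · rfl

-- ===== VERDICT (by name: the statement is the Claim_ definition above) =====
theorem get_run_length_spec : Claim_equal_get_run_length := by
  intro mw _ _
  unfold Spec_get_run_length get_run_length_alt
  rw [pv_bridgeA]
  have := pv_revRun mw.reverse
  simpa using this
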